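-- pv_equiv track=rewrite | github.com/sabi-h/qpyr | qpyr/data_masking.py | _calculate_adjacent_penalty_inline
-- ===== SOURCE A (Python) =====
-- from typing import Callable, List
--
-- class PenaltyPoint:
--     N1 = 3
--     N2 = 3
--     N3 = 40
--     N4 = 10
--
-- def _calculate_adjacent_penalty_inline(array: List[int]) -> int:
--     consecutive_run = 1
--     score = 0
--     for i, num in enumerate(array):
--         if i == 0:
--             continue
--
--         previous_number = array[i - 1]
--
--         if num == previous_number:
--             consecutive_run += 1
--             if consecutive_run == 5:
--                 score += PenaltyPoint.N1
--             elif consecutive_run > 5: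
--                 score += 1
--         else:
--             consecutive_run = 1
--
--     return score
-- ===== SOURCE B (Python) =====
-- from itertools import groupby
--
-- def _calculate_adjacent_penalty_inline(array):
--     score = 0
--     for _, group in groupby(array):
--         run_length = sum(1 for _ in group)
--         if run_length >= 5:
--             score += run_length - 2
--     return score
-- ===== Notes on version B (the rewrite author's own statement) =====
-- stated objective: simpler
-- what changed: Replaces the interleaved run-counter/score branching over indexed pairs with itertools.groupby: split into maximal equal runs and add the closed-form penalty L-2 for each run of length L >= 5.
import Mathlib
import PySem

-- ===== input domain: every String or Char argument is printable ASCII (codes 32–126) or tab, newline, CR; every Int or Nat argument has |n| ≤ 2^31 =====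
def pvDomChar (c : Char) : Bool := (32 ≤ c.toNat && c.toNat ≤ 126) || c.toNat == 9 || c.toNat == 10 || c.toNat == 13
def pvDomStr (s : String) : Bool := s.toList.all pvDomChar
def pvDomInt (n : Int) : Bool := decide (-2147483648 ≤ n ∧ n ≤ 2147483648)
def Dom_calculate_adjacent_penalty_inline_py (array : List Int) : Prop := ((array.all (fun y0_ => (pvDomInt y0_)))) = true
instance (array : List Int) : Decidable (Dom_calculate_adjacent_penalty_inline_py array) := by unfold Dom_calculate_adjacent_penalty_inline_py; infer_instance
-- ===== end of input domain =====

-- B replaces A's inline run-counter/score branching with a split into maximal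
-- equal runs and a closed-form penalty (L - 2 for runs of length L ≥ 5): simpler decomposition, same O(n) cost.


-- ===== PORT A =====
-- A's loop skips i = 0 and at each i ≥ 1 compares array[i] with array[i-1]; that
-- stream of (previous_number, num) pairs is exactly array.zip (array.drop 1),
-- over which the loop body is folded with the same (consecutive_run, score) state
-- and the same branch order.
def pvStepA (st : Int × Int) (p : Int × Int) : Int × Int :=
  if p.2 == p.1 then
    let run := st.1 + 1
    (run, st.2 + (if run == 5 then 3 else if run > 5 then 1 else 0))
  else
    (1, st.2)

def calculate_adjacent_penalty_inline_py (array : List Int) : Int :=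
  ((array.zip (array.drop 1)).foldl pvStepA (1, 0)).2

-- ===== PORT B =====
-- groupby(array): lengths of the maximal consecutive-equal runs.
def pvRunsGo (cur : Int) (n : Nat) : List Int → List Nat
  | [] => [n]
  | y :: ys => if y == cur then pvRunsGo cur (n + 1) ys else n :: pvRunsGo y 1 ys

def pvRunLengths : List Int → List Nat
  | [] => []
  | x :: xs => pvRunsGo x 1 xs

def calculate_adjacent_penalty_inline_py_alt (array : List Int) : Int :=
  ((pvRunLengths array).map (fun L => if (L : Int) ≥ 5 then (L : Int) - 2 else 0)).sum

-- ===== PRECONDITION & SPEC =====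
def Spec_calculate_adjacent_penalty_inline_py (array : List Int) (out : Int) : Prop := out = calculate_adjacent_penalty_inline_py_alt array
instance (array : List Int) (out : Int) : Decidable (Spec_calculate_adjacent_penalty_inline_py array out) := by unfold Spec_calculate_adjacent_penalty_inline_py; infer_instance

-- ===== CLAIM (what is proved, stated in full; the proofs are below) =====
def Claim_equal_calculate_adjacent_penalty_inline_py : Prop := ∀ (array : List Int), Dom_calculate_adjacent_penalty_inline_py array → Spec_calculate_adjacent_penalty_inline_py array (calculate_adjacent_penalty_inline_py array)

-- ===== LEMMAS AND PROOFS =====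
def pvPen (L : Int) : Int := if L ≥ 5 then L - 2 else 0

theorem pvLoopA_eq (ys : List Int) : ∀ (c : Int) (n : Nat) (score : Int),
    ((((c :: ys).zip ys).foldl pvStepA ((n : Int), score)).2)
      = score + ((pvRunsGo c n ys).map (fun L => pvPen (L : Int))).sum - pvPen (n : Int) := by
  induction ys with
  | nil => intro c n score; simp [pvRunsGo]
  | cons y ys ih =>
    intro c n score
    by_cases h : y = c
    · subst h
      have h1 : ((((y : Int) :: y :: ys).zip (y :: ys)).foldl pvStepA ((n : Int), score)).2
          = (((y :: ys).zip ys).foldl pvStepA (((n : Nat) + 1 : Nat),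
              score + (if ((n : Int) + 1) == 5 then 3 else if ((n : Int) + 1) > 5 then 1 else 0))).2 := by
        simp [pvStepA]
      rw [h1, ih]
      simp only [pvRunsGo, beq_self_eq_true, if_pos]
      simp only [pvPen]
      push_cast
      split_ifs <;> simp_all <;> omega
    · have hb : (y == c) = false := by simp [h]
      have h1 : (((c :: y :: ys).zip (y :: ys)).foldl pvStepA ((n : Int), score)).2
          = (((y :: ys).zip ys).foldl pvStepA (((1 : Nat) : Int), score)).2 := by
        simp [pvStepA, hb]
      rw [h1, ih]
      simp [pvRunsGo, hb, pvPen]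
      omega

-- ===== VERDICT (by name: the statement is the Claim_ definition above) =====
theorem calculate_adjacent_penalty_inline_py_spec : Claim_equal_calculate_adjacent_penalty_inline_py := by
  intro array _
  unfold Spec_calculate_adjacent_penalty_inline_py
  cases array with
  | nil => rfl
  | cons x xs =>
    show (((x :: xs).zip xs).foldl pvStepA ((1 : Nat), 0)).2 = _
    rw [pvLoopA_eq]
    simp [calculate_adjacent_penalty_inline_py_alt, pvRunLengths, pvPen]
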